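-- pv_equiv track=rewrite | github.com/W0tazix/St00dia | matura informatyka/Matura 2023/Maj/Zadanie 2.1.py | ileblokow2
-- ===== SOURCE A (Python) =====
-- def ileblokow2(n):
--     b = 1
--     pop = n%2
--     n = n//2
--     while  n != 0:
--         cyf=n%2
--         if cyf != pop:
--             b+=1
--             pop = cyf
--         n=n//2
--     return b
-- ===== SOURCE B (Python) =====
-- def ileblokow2(n):
--     s = bin(n)[2:]
--     return 1 + sum(a != b for a, b in zip(s, s[1:]))
-- ===== Notes on version B (the rewrite author's own statement) =====
-- stated objective: idiomatic
-- what changed: Replaced the modular bit-extraction while-loop carrying previous-bit state with a string-based pass: take bin(n)[2:] and count adjacent unequal character pairs via zip, so the answer is 1 + number of run boundaries.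
-- outside the precondition, e.g. on ileblokow2(-1): A does not finish within the time limit, B returns 2
import Mathlib
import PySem

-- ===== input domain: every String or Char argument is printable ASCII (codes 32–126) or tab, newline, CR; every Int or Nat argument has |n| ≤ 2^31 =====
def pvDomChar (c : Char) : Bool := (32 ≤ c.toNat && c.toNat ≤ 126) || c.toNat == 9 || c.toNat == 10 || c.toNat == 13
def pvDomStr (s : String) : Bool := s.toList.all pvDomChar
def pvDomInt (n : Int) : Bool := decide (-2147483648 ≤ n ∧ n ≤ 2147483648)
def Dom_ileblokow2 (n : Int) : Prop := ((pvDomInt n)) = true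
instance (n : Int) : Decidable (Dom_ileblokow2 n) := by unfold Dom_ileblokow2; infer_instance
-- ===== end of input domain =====

-- B counts runs over the binary string bin(n)[2:] with an adjacent-pair zip instead of A's
-- modular bit-extraction loop; idiomatic, same cost. Equivalence is claimed for n ≥ 0
-- (A's while-loop never terminates for negative n, since n//2 stays at -1).

-- ===== PORT A =====
-- the while-loop of A; the 'n < 0' guard only makes the function total where the Python loop diverges
def ileblokow2Loop (n pop b : Int) : Int :=
  if n = 0 then b
  else if h : n < 0 then b
  else
    let cyf := PySem.Int.mod n 2
    let pop' := if cyf ≠ pop then cyf else pop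
    let b' := if cyf ≠ pop then b + 1 else b
    ileblokow2Loop (PySem.Int.floordiv n 2) pop' b'
termination_by n.toNat
decreasing_by
  have h2 : PySem.Int.floordiv n 2 = n / 2 := PySem.Int.floordiv_eq_ediv_of_pos (by omega)
  simp only [h2]; omega

def ileblokow2 (n : Int) : Int :=
  let b := 1
  let pop := PySem.Int.mod n 2
  let n' := PySem.Int.floordiv n 2
  ileblokow2Loop n' pop b

-- ===== PORT B =====
-- hand port of bin(m)[2:] as a list of characters (exact for m ≥ 0: most-significant bit first, "0" for 0)
def binAux : Nat → List Char
  | 0 => []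
  | m + 1 => binAux ((m + 1) / 2) ++ [if (m + 1) % 2 = 1 then '1' else '0']

def binChars (m : Nat) : List Char := if m = 0 then ['0'] else binAux m

def ileblokow2_alt (n : Int) : Int :=
  let s := binChars n.toNat
  1 + ((s.zip (s.drop 1)).map (fun p => if p.1 ≠ p.2 then (1 : Int) else 0)).sum

-- ===== PRECONDITION & SPEC =====
-- Pre_ excludes negative n, on which the Python A's while-loop never terminates (n//2 stays -1)
def Pre_ileblokow2 (n : Int) : Prop := 0 ≤ n
instance (n : Int) : Decidable (Pre_ileblokow2 n) := by unfold Pre_ileblokow2; infer_instance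
def pvWitness_ileblokow2 : Int := 11

def Spec_ileblokow2 (n : Int) (out : Int) : Prop := out = ileblokow2_alt n
instance (n : Int) (out : Int) : Decidable (Spec_ileblokow2 n out) := by unfold Spec_ileblokow2; infer_instance

-- ===== CLAIM (what is proved, stated in full; the proofs are below) =====
def Claim_equal_ileblokow2 : Prop := ∀ (n : Int), Dom_ileblokow2 n → Pre_ileblokow2 n → Spec_ileblokow2 n (ileblokow2 n)

-- ===== LEMMAS AND PROOFS =====

-- bits of a Nat, least significant first
def lsbBits : Nat → List Int
  | 0 => []
  | m + 1 => (((m + 1) % 2 : Nat) : Int) :: lsbBits ((m + 1) / 2)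

-- number of adjacent unequal pairs in a list
def adjCount {α : Type} [DecidableEq α] : List α → Int
  | [] => 0
  | [_] => 0
  | a :: b :: r => (if a ≠ b then 1 else 0) + adjCount (b :: r)

theorem lsbBits_succ (m : Nat) (h : m ≠ 0) :
    lsbBits m = ((m % 2 : Nat) : Int) :: lsbBits (m / 2) := by
  cases m with
  | zero => exact absurd rfl h
  | succ k => simp only [lsbBits]

theorem loop_eq_adjCount (m : Nat) (pop b : Int) :
    ileblokow2Loop (m : Int) pop b = b + adjCount (pop :: lsbBits m) := by
  induction m using Nat.strong_induction_on generalizing pop b with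
  | _ m ih =>
    by_cases h0 : m = 0
    · subst h0; simp [ileblokow2Loop, lsbBits, adjCount]
    · rw [ileblokow2Loop]
      have hm : ((m : Int)) ≠ 0 := by exact_mod_cast h0
      have hneg : ¬ ((m : Int) < 0) := by omega
      rw [if_neg hm, dif_neg hneg]
      have hmod : PySem.Int.mod (m : Int) 2 = ((m % 2 : Nat) : Int) :=
        PySem.Int.mod_natCast m 2
      have hdiv : PySem.Int.floordiv (m : Int) 2 = ((m / 2 : Nat) : Int) :=
        PySem.Int.floordiv_natCast m 2
      rw [hmod, hdiv, ih (m / 2) (by omega), lsbBits_succ m h0]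
      by_cases hc : ((m % 2 : Nat) : Int) = pop
      · rw [if_neg (by simp [hc]), if_neg (by simp [hc])]
        have : adjCount (pop :: ((m % 2 : Nat) : Int) :: lsbBits (m / 2)) =
            (if pop ≠ ((m % 2 : Nat) : Int) then (1:Int) else 0)
              + adjCount (((m % 2 : Nat) : Int) :: lsbBits (m / 2)) := rfl
        rw [this, if_neg (by simp [hc]), hc]
        ring
      · rw [if_pos (by simpa using hc), if_pos (by simpa using hc)]
        have : adjCount (pop :: ((m % 2 : Nat) : Int) :: lsbBits (m / 2)) =
            (if pop ≠ ((m % 2 : Nat) : Int) then (1:Int) else 0)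
              + adjCount (((m % 2 : Nat) : Int) :: lsbBits (m / 2)) := rfl
        rw [this, if_pos (fun e => hc e.symm)]
        ring

theorem adjCount_append_singleton {α : Type} [DecidableEq α] (l : List α) (a : α) :
    adjCount (l ++ [a]) = adjCount l + (match l.getLast? with
      | none => 0
      | some x => if x ≠ a then 1 else 0) := by
  induction l with
  | nil => simp [adjCount]
  | cons x r ih =>
    cases r with
    | nil => simp [adjCount]
    | cons y t =>
      have h1 : adjCount (x :: ((y :: t) ++ [a])) =
          (if x ≠ y then (1:Int) else 0) + adjCount ((y :: t) ++ [a]) := rfl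
      have h2 : adjCount (x :: y :: t) =
          (if x ≠ y then (1:Int) else 0) + adjCount (y :: t) := rfl
      rw [List.cons_append, h1, ih, h2]
      have : (x :: y :: t).getLast? = (y :: t).getLast? := by
        simp [List.getLast?_cons_cons]
      rw [this]; ring

theorem adjCount_reverse {α : Type} [DecidableEq α] (l : List α) :
    adjCount l.reverse = adjCount l := by
  induction l with
  | nil => rfl
  | cons a r ih =>
    cases r with
    | nil => rfl
    | cons b t =>
      have h1 : (a :: b :: t).reverse = (b :: t).reverse ++ [a] := by simp
      rw [h1, adjCount_append_singleton, ih]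
      have h2 : (b :: t).reverse.getLast? = some b := by
        rw [List.getLast?_reverse]; rfl
      rw [h2]
      have h3 : adjCount (a :: b :: t) = (if a ≠ b then (1:Int) else 0) + adjCount (b :: t) := rfl
      rw [h3]
      rcases eq_or_ne a b with hab | hab
      · simp [hab]
      · have hba : b ≠ a := fun e => hab e.symm
        simp only [if_pos hab, if_pos hba]
        ring

-- zip-based sum over a char list equals adjCount
theorem zipsum_eq_adjCount (s : List Char) :
    ((s.zip (s.drop 1)).map (fun p => if p.1 ≠ p.2 then (1 : Int) else 0)).sum = adjCount s := by
  induction s with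
  | nil => rfl
  | cons a r ih =>
    cases r with
    | nil => rfl
    | cons b t =>
      have h1 : (a :: b :: t).zip ((a :: b :: t).drop 1) = (a, b) :: ((b :: t).zip ((b :: t).drop 1)) := by
        simp [List.zip]
      rw [h1, List.map_cons, List.sum_cons, ih]
      rfl

-- binAux is the reverse of the char image of lsbBits
def bitChar (i : Int) : Char := if i = 1 then '1' else '0'

theorem binAux_eq (m : Nat) :
    binAux m = ((lsbBits m).map bitChar).reverse := by
  induction m using Nat.strong_induction_on with
  | _ m ih =>
    cases m with
    | zero => simp [binAux, lsbBits]
    | succ k =>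
      have hch : bitChar (((k+1) % 2 : Nat) : Int) = (if (k + 1) % 2 = 1 then '1' else '0') := by
        unfold bitChar
        by_cases h : (k+1) % 2 = 1
        · rw [if_pos h, if_pos (by exact_mod_cast h)]
        · rw [if_neg h, if_neg (by exact_mod_cast h)]
      rw [binAux, ih ((k+1)/2) (by omega), lsbBits_succ (k+1) (by omega), List.map_cons,
        List.reverse_cons, hch]

def isBits (l : List Int) : Prop := ∀ x ∈ l, x = 0 ∨ x = 1

theorem lsbBits_isBits (m : Nat) : isBits (lsbBits m) := by
  induction m using Nat.strong_induction_on with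
  | _ m ih =>
    cases m with
    | zero => intro x hx; simp [lsbBits] at hx
    | succ k =>
      intro x hx
      rw [lsbBits_succ (k+1) (by omega)] at hx
      rcases List.mem_cons.mp hx with h | h
      · subst h; omega
      · exact ih ((k+1)/2) (by omega) x h

theorem adjCount_map_bitChar (l : List Int) (hl : isBits l) :
    adjCount (l.map bitChar) = adjCount l := by
  induction l with
  | nil => rfl
  | cons a r ih =>
    cases r with
    | nil => rfl
    | cons b t =>
      have hb : isBits (b :: t) := fun x hx => hl x (List.mem_cons_of_mem _ hx)
      have h1 : adjCount ((a :: b :: t).map bitChar) =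
          (if bitChar a ≠ bitChar b then (1:Int) else 0) + adjCount ((b :: t).map bitChar) := rfl
      have h2 : adjCount (a :: b :: t) = (if a ≠ b then (1:Int) else 0) + adjCount (b :: t) := rfl
      rw [h1, h2, ih hb]
      rcases eq_or_ne a b with hab | hab
      · simp [hab]
      · have hbc : bitChar a ≠ bitChar b := by
          rcases hl a (by simp) with h | h <;> rcases hl b (by simp) with g | g <;>
            subst h <;> subst g <;> simp_all [bitChar]
        rw [if_pos hbc, if_pos hab]

theorem ileblokow2_spec' : ∀ (n : Int), 0 ≤ n → ileblokow2 n = ileblokow2_alt n := by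
  intro n hn
  obtain ⟨m, rfl⟩ := Int.eq_ofNat_of_zero_le hn
  unfold ileblokow2 ileblokow2_alt
  have hmod : PySem.Int.mod (m : Int) 2 = ((m % 2 : Nat) : Int) := PySem.Int.mod_natCast m 2
  have hdiv : PySem.Int.floordiv (m : Int) 2 = ((m / 2 : Nat) : Int) := PySem.Int.floordiv_natCast m 2
  have htn : ((m : Int)).toNat = m := Int.toNat_natCast m
  simp only [hmod, hdiv, htn]
  rw [loop_eq_adjCount, zipsum_eq_adjCount]
  by_cases h0 : m = 0
  · subst h0; simp [binChars, lsbBits, adjCount]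
  · rw [binChars, if_neg h0, binAux_eq, adjCount_reverse,
      adjCount_map_bitChar _ (lsbBits_isBits m), ← lsbBits_succ m h0]

-- ===== VERDICT (by name: the statement is the Claim_ definition above) =====
theorem ileblokow2_spec : Claim_equal_ileblokow2 := by
  intro n _ hpre
  exact ileblokow2_spec' n hpre
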